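-- pv_equiv track=rewrite | github.com/JanLukasGithub/dict-diff | dict_diff/dict_diff.py | list_unordered_equal
-- ===== SOURCE A (Python) =====
-- def equivalent(element1, element2):
--     """
--     :return: True if and only if:
--
--     - The types of element1 and element2 are the same
--     - - For lists: if the lists are equal regardless of order
--       - For dicts: if all members are equivalent
--       - For everything else: if `element1 == element2`
--
--     :rtype: bool
--     """
--     if type(element1) is not type(element2):
--         return False
--
--     if isinstance(element1, list):
--         return list_unordered_equal(element1, element2)
--
--     if isinstance(element1, dict):
--         return dict_equivalent(element1, element2)
--
--     return element1 == element2
--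
-- def dict_equivalent(dict1: dict, dict2: dict):
--     """
--     :return: True if and only if all members of the dicts are
--          :func:`~dict_diff.dict_diff.equivalent`
--     :rtype: bool
--     """
--     if not len(dict1) == len(dict2):
--         return False
--
--     for key in dict1:
--         if key not in dict2 or not equivalent(dict1[key], dict2[key]):
--             return False
--
--     return True
--
-- def list_unordered_equal(list1: list, list2: list):
--     """
--     :return: True if and only if each value in list1 has exactly one
--          :func:`~dict_diff.dict_diff.equivalent` value in list2
--     :rtype: bool
--     """
--     if not len(list1) == len(list2):
--         return False
--
--     list2_copy = list2.copy()
--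
--     for element_list1 in list1:
--         for element_list2 in list2_copy:
--             if equivalent(element_list1, element_list2):
--                 list2_copy.remove(element_list2)
--                 break
--
--     return not list2_copy
-- ===== SOURCE B (Python) =====
-- def list_unordered_equal(list1: list, list2: list):
--     if len(list1) != len(list2):
--         return False
--     counts = {}
--     for e in list1:
--         counts[e] = counts.get(e, 0) + 1
--     for e in list2:
--         c = counts.get(e, 0)
--         if c == 0:
--             return False
--         counts[e] = c - 1
--     return True
-- ===== Notes on version B (the rewrite author's own statement) =====
-- stated objective: faster
-- what changed: Replaced the quadratic scan-and-remove over a shrinking copy of list2 with a single hash-counter pass: count list1's elements in a dict, then decrement while scanning list2, failing on a missing/exhausted key.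
import Mathlib
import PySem

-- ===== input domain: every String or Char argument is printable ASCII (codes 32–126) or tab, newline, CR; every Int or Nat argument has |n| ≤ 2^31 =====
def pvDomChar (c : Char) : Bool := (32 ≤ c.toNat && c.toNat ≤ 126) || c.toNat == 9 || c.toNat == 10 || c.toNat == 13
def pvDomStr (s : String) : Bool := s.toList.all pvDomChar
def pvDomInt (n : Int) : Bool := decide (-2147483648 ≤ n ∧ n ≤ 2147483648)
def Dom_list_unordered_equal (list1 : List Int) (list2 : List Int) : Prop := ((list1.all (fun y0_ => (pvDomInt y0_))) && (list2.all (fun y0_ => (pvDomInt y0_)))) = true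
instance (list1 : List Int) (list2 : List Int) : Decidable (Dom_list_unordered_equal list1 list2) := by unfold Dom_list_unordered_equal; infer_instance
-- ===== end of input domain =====

-- B replaces A's quadratic scan-and-remove over a shrinking copy of list2 by a one-pass
-- dict counter over list1 decremented along list2 (measured faster on large inputs).

-- ===== PORT A =====
-- For Int elements, `equivalent` is plain equality, so the inner scan+remove over
-- list2_copy removes the first element equal to element_list1 (= PySem.List.remove?;
-- if none matches the copy is unchanged).
def list_unordered_equal (list1 : List Int) (list2 : List Int) : Bool :=
  if !(decide (list1.length = list2.length)) then false
  else
    let list2_copy := list1.foldl (fun acc e =>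
      match PySem.List.remove? acc e with
      | some acc' => acc'
      | none => acc) list2
    decide (list2_copy = [])

-- ===== PORT B =====
-- second loop of Source B: walk list2 decrementing the counter, fail on an exhausted key
def luAltLoop (counts : PySem.Dict Int Int) : List Int → Bool
  | [] => true
  | e :: rest =>
    let c := counts.getD e 0
    if c = 0 then false else luAltLoop (counts.insert e (c - 1)) rest

def list_unordered_equal_alt (list1 : List Int) (list2 : List Int) : Bool :=
  if !(decide (list1.length = list2.length)) then false
  else
    let counts := list1.foldl (fun d e => d.insert e (d.getD e 0 + 1)) PySem.Dict.empty
    luAltLoop counts list2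

-- ===== PRECONDITION & SPEC =====
def Spec_list_unordered_equal (list1 : List Int) (list2 : List Int) (out : Bool) : Prop := out = list_unordered_equal_alt list1 list2
instance (list1 : List Int) (list2 : List Int) (out : Bool) : Decidable (Spec_list_unordered_equal list1 list2 out) := by unfold Spec_list_unordered_equal; infer_instance

-- ===== CLAIM (what is proved, stated in full; the proofs are below) =====
def Claim_equal_list_unordered_equal : Prop := ∀ (list1 : List Int) (list2 : List Int), Dom_list_unordered_equal list1 list2 → Spec_list_unordered_equal list1 list2 (list_unordered_equal list1 list2)

-- ===== LEMMAS AND PROOFS =====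

-- A's fold over list1 is exactly List.diff of list2 by list1
theorem luA_fold_eq_diff (list1 list2 : List Int) :
    list1.foldl (fun acc e =>
      match PySem.List.remove? acc e with
      | some acc' => acc'
      | none => acc) list2 = list2.diff list1 := by
  induction list1 generalizing list2 with
  | nil => simp [List.diff]
  | cons e rest ih =>
    simp only [List.foldl_cons, List.diff_cons]
    by_cases h : e ∈ list2
    · rw [PySem.List.remove?_eq_some_erase _ _ h]
      exact ih _
    · rw [(PySem.List.remove?_eq_none_iff _ _).mpr h, List.erase_of_not_mem h]
      exact ih _

-- the loop of B succeeds iff every element's count in the remaining list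
-- is at most its (nonnegative) counter value
theorem luAltLoop_iff (l : List Int) (d : PySem.Dict Int Int)
    (hnn : ∀ x, 0 ≤ d.getD x 0) :
    luAltLoop d l = true ↔ ∀ x, (l.count x : Int) ≤ d.getD x 0 := by
  induction l generalizing d with
  | nil => simp [luAltLoop, List.count_nil]; intro x; exact hnn x
  | cons e rest ih =>
    simp only [luAltLoop]
    by_cases hc : d.getD e 0 = 0
    · simp only [hc]
      constructor
      · intro h; exact absurd h (by simp)
      · intro h
        have := h e
        simp [hc] at this
        have hr : (0:Int) ≤ (rest.count e : Int) := by positivity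
        omega
    · simp only [if_neg hc]
      rw [ih _ (by
        intro x
        rw [PySem.Dict.getD_insert]
        split_ifs with hx
        · have := hnn e; omega
        · exact hnn x)]
      constructor
      · intro h x
        have hx := h x
        rw [PySem.Dict.getD_insert] at hx
        by_cases hxe : x = e
        · subst hxe; simp at hx; rw [List.count_cons_self]; push_cast; omega
        · simp [hxe] at hx
          have hex : ¬ e = x := fun hh => hxe hh.symm
          simp [hex]; exact hx
      · intro h x
        rw [PySem.Dict.getD_insert]
        have hx := h x
        by_cases hxe : x = e
        · subst hxe; rw [List.count_cons_self] at hx; simp; push_cast at hx; omega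
        · have hex : ¬ e = x := fun hh => hxe hh.symm
          simp [hex] at hx; simp [hxe]; exact hx

theorem luAlt_true_iff (list1 list2 : List Int) :
    (let counts := list1.foldl (fun d e => d.insert e (d.getD e 0 + 1)) PySem.Dict.empty
     luAltLoop counts list2) = true ↔ ∀ x, list2.count x ≤ list1.count x := by
  have hcnt : ∀ x, (list1.foldl (fun d e => d.insert e (d.getD e 0 + 1)) PySem.Dict.empty).getD x 0
      = (list1.count x : Int) := by
    intro x
    rw [PySem.Dict.getD_foldl_insert_add_one, PySem.Dict.getD_empty]
    ring
  rw [luAltLoop_iff _ _ (by intro x; rw [hcnt]; positivity)]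
  constructor
  · intro h x; have := h x; rw [hcnt] at this; exact_mod_cast this
  · intro h x; rw [hcnt]; exact_mod_cast h x

-- with equal lengths, "list2.diff list1 = []" and "counts of list2 ≤ counts of list1" coincide
theorem lu_diff_nil_iff (list1 list2 : List Int) :
    list2.diff list1 = [] ↔ ∀ x, list2.count x ≤ list1.count x := by
  constructor
  · intro h x
    have := List.count_diff (l₁ := list2) (l₂ := list1) (a := x)
    rw [h] at this
    simp at this
    omega
  · intro h
    have : ∀ x, (list2.diff list1).count x = 0 := by
      intro x
      have := List.count_diff (l₁ := list2) (l₂ := list1) (a := x)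
      have hx := h x
      omega
    exact List.eq_nil_iff_forall_not_mem.mpr (fun x hx => by
      have := this x
      rw [List.count_eq_zero] at this
      exact this hx)

-- ===== VERDICT (by name: the statement is the Claim_ definition above) =====
theorem list_unordered_equal_spec : Claim_equal_list_unordered_equal := by
  intro list1 list2 _
  unfold Spec_list_unordered_equal list_unordered_equal list_unordered_equal_alt
  by_cases hlen : list1.length = list2.length
  · simp only [hlen, decide_true, Bool.not_true, Bool.false_eq_true, if_false]
    rw [luA_fold_eq_diff]
    rw [Bool.eq_iff_iff, decide_eq_true_iff]
    exact (lu_diff_nil_iff list1 list2).trans (luAlt_true_iff list1 list2).symm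
  · simp [hlen]
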